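-- pv_equiv track=rewrite | github.com/Linyue-dev/PIV_Python_Lab | Test_1_review/dict_prefixes.py | prefixes_set
-- ===== SOURCE A (Python) =====
-- def prefixes_set(list) ->set:
--     prefix_dict = {}
--     prefix_set = set()
--     for word in list:
--         charactor = ""
--         for i in range(len(word)):
--             charactor += word[i]
--             prefix_set.add(charactor)
--     return prefix_set
-- ===== SOURCE B (Python) =====
-- def prefixes_set(list) -> set:
--     # Stateless: each prefix is taken directly as a slice word[:i],
--     # no accumulator string and no dead dict.
--     return {word[:i] for word in list for i in range(1, len(word) + 1)}
-- ===== Notes on version B (the rewrite author's own statement) =====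
-- stated objective: simpler
-- what changed: Replaces A's incremental character-by-character accumulator string (and drops its dead dict) with a one-line set comprehension that takes each prefix directly as a slice word[:i], maintaining no running state.
import Mathlib
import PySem

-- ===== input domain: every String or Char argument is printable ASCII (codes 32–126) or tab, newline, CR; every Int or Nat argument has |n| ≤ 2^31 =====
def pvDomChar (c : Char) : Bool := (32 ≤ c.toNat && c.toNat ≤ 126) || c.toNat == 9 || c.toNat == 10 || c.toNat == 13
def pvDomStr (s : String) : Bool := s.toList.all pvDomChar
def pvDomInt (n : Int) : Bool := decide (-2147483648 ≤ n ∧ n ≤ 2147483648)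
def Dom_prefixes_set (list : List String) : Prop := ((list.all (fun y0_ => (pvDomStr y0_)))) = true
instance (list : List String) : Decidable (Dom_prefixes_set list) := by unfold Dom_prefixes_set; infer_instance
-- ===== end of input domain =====

-- B drops A's running accumulator string (and A's dead dict) and collects each
-- prefix directly as a slice word[:i] in a set comprehension; equal output, simpler.

-- ===== PORT A =====
-- A's 'charactor' string is carried as a List Char (kernel-transparent); charactor += word[i]
-- is appending the i-th character; the dead 'prefix_dict' is omitted (never read or written usefully).
def prefixes_set (list : List String) : List String :=
  list.foldl
    (fun prefix_set word =>
      ((PySem.List.pyRange 0 (PySem.Str.len word) 1).foldl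
        (fun (st : List Char × PySem.Set String) i =>
          let charactor := st.1 ++ [PySem.List.pyGetD word.toList i ' ']
          (charactor, PySem.Set.add st.2 (String.ofList charactor)))
        (([] : List Char), prefix_set)).2)
    PySem.Set.empty

-- ===== PORT B =====
def prefixes_set_alt (list : List String) : List String :=
  PySem.Set.ofList (list.flatMap (fun word =>
    (PySem.List.pyRange 1 (PySem.Str.len word + 1) 1).map
      (fun i => String.ofList (PySem.List.slice word.toList none (some i)))))

-- ===== PRECONDITION & SPEC =====
def Spec_prefixes_set (list : List String) (out : List String) : Prop := out = prefixes_set_alt list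
instance (list : List String) (out : List String) : Decidable (Spec_prefixes_set list out) := by unfold Spec_prefixes_set; infer_instance

-- ===== CLAIM (what is proved, stated in full; the proofs are below) =====
def Claim_equal_prefixes_set : Prop := ∀ (list : List String), Dom_prefixes_set list → Spec_prefixes_set list (prefixes_set list)

-- ===== LEMMAS AND PROOFS =====

-- A's inner loop, seen over the word's characters: starting from prefix p it adds
-- exactly the strings p ++ (first k+1 chars) in increasing k, folded into the set.
lemma innerA (cs : List Char) : ∀ (p : List Char) (acc : PySem.Set String),
    (cs.foldl
      (fun (st : List Char × PySem.Set String) ch =>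
        (st.1 ++ [ch], PySem.Set.add st.2 (String.ofList (st.1 ++ [ch]))))
      (p, acc)).2
    = ((List.range cs.length).map (fun k => String.ofList (p ++ cs.take (k + 1)))).foldl
        PySem.Set.add acc := by
  induction cs with
  | nil => intro p acc; simp
  | cons c cs ih =>
    intro p acc
    simp only [List.foldl_cons, List.length_cons, List.range_succ_eq_map,
      List.map_cons, List.map_map, List.take_succ_cons, ih]
    simp [Function.comp_def]

-- B's per-word slice list is the same prefix list.
lemma perWordB (cs : List Char) :
    (PySem.List.pyRange 1 ((cs.length : Int) + 1) 1).map
        (fun i => String.ofList (PySem.List.slice cs none (some i)))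
    = (List.range cs.length).map (fun k => String.ofList (cs.take (k + 1))) := by
  rw [PySem.List.pyRange_one]
  have h0 : (((cs.length : Int) + 1) - 1).toNat = cs.length := by omega
  rw [h0, List.map_map]
  apply List.map_congr_left
  intro k hk
  simp only [Function.comp_apply]
  rw [(by push_cast; ring : (1 : Int) + (k : Int) = ((k + 1 : Nat) : Int)),
    PySem.List.slice_to_natCast]

-- folding Set.add over a flatMap = nested fold.
lemma foldl_add_flatMap {α : Type} (g : α → List String) (l : List α) :
    ∀ (s : PySem.Set String),
    (l.flatMap g).foldl PySem.Set.add s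
      = l.foldl (fun s w => (g w).foldl PySem.Set.add s) s := by
  induction l with
  | nil => intro s; simp
  | cons x l ih => intro s; simp [List.flatMap_cons, List.foldl_append, ih]

-- ===== VERDICT (by name: the statement is the Claim_ definition above) =====
theorem prefixes_set_spec : Claim_equal_prefixes_set := by
  intro list _
  unfold Spec_prefixes_set prefixes_set prefixes_set_alt
  rw [PySem.Set.ofList_eq_foldl, foldl_add_flatMap]
  congr 1
  funext prefix_set word
  have hlen : PySem.Str.len word = (word.toList.length : Int) := by
    simp [PySem.Str.len_eq]
  rw [hlen,
    PySem.List.foldl_pyRange_zero_pyGetD' word.toList ' '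
      (fun (st : List Char × PySem.Set String) ch =>
        (st.1 ++ [ch], PySem.Set.add st.2 (String.ofList (st.1 ++ [ch]))))
      (([] : List Char), prefix_set),
    innerA, perWordB]
  simp
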